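-- pv_equiv track=rewrite | github.com/mostlyharmless-ai/watercooler-dashboard | src/watercooler_dashboard/thread_parser.py | _split_header_and_body
-- ===== SOURCE A (Python) =====
-- def _split_header_and_body(content: str) -> tuple[list[str], str]:
--     """Split raw thread content into header lines and body text."""
--
--     lines = content.splitlines()
--     header_lines: list[str] = []
--     body_lines: list[str] = []
--
--     in_header = True
--     for line in lines:
--         if in_header and line.strip() == "---":
--             in_header = False
--             continue
--
--         if in_header:
--             header_lines.append(line)
--         else:
--             body_lines.append(line)
--
--     while header_lines and not header_lines[-1].strip():
--         header_lines.pop()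
--
--     while body_lines and body_lines[0].strip() == "---":
--         body_lines.pop(0)
--
--     body_text = "\n".join(body_lines).strip()
--     return header_lines, body_text
-- ===== SOURCE B (Python) =====
-- def _split_header_and_body(content: str) -> tuple[list[str], str]:
--     """Split raw thread content into header lines and body text."""
--
--     lines = content.splitlines()
--
--     # index of the first '---' separator line (len(lines) if none)
--     idx = next((i for i, l in enumerate(lines) if l.strip() == "---"), len(lines))
--
--     # header = lines[:idx] without trailing blank lines, by shrinking the end index
--     end = idx
--     while end > 0 and not lines[end - 1].strip():
--         end -= 1
--     header_lines = lines[:end]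
--
--     # body = lines after the separator, skipping further leading '---' lines
--     body = lines[idx + 1:]
--     k = 0
--     while k < len(body) and body[k].strip() == "---":
--         k += 1
--
--     return header_lines, "\n".join(body[k:]).strip()
-- ===== Notes on version B (the rewrite author's own statement) =====
-- stated objective: simpler
-- what changed: Replaces A's stateful in_header routing loop (and the two pop-mutation loops) by computing the index of the first separator line once, slicing header/body from it, and trimming via index arithmetic.
import Mathlib
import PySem

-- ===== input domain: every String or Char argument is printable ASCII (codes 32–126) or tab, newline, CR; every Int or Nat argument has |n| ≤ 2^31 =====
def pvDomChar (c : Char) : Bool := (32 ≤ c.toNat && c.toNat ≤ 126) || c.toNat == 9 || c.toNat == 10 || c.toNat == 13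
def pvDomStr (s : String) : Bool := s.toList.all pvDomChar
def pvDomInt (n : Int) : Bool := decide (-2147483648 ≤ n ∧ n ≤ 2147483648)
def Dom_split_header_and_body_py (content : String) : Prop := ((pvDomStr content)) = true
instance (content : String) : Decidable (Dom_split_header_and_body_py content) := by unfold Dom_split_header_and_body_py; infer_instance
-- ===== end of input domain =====

-- B replaces A's stateful in_header routing loop by find-the-separator-index then slicing (simpler decomposition).

-- ===== PORT A =====
-- `while header_lines and not header_lines[-1].strip(): header_lines.pop()` (pop loop, expressed on the reversed list; exact)
def pvPopTrailA (h : List String) : List String :=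
  ((h.reverse).dropWhile (fun l => PySem.Str.strip l == "")).reverse

-- `while body_lines and body_lines[0].strip() == "---": body_lines.pop(0)`
def pvPopLeadA : List String → List String
  | [] => []
  | x :: xs => if PySem.Str.strip x == "---" then pvPopLeadA xs else x :: xs

-- the body of A's for-loop, as one step of the fold
def pvStepA (st : List String × List String × Bool) (line : String) : List String × List String × Bool :=
  match st with
  | (header, body, inh) =>
    if inh && (PySem.Str.strip line == "---") then (header, body, false)
    else if inh then (header ++ [line], body, inh)
    else (header, body ++ [line], inh)

def split_header_and_body_py (content : String) : List String × String :=
  let lines := PySem.Str.splitlines content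
  let st := lines.foldl pvStepA ([], [], true)
  let header := pvPopTrailA st.1
  let body := pvPopLeadA st.2.1
  (header, PySem.Str.strip (PySem.Str.join "\n" body))

-- ===== PORT B =====
-- `while end > 0 and not lines[end-1].strip(): end -= 1`
def pvTrimEndB (lines : List String) : Nat → Nat
  | 0 => 0
  | e + 1 => if PySem.Str.strip (lines.getD e "") == "" then pvTrimEndB lines e else e + 1

-- `k = 0; while k < len(body) and body[k].strip() == "---": k += 1`
def pvSkipDashesB : List String → Nat
  | [] => 0
  | x :: xs => if PySem.Str.strip x == "---" then pvSkipDashesB xs + 1 else 0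

def split_header_and_body_py_alt (content : String) : List String × String :=
  let lines := PySem.Str.splitlines content
  let idx := lines.findIdx (fun l => PySem.Str.strip l == "---")
  let header := lines.take (pvTrimEndB lines idx)
  let body := lines.drop (idx + 1)
  let k := pvSkipDashesB body
  (header, PySem.Str.strip (PySem.Str.join "\n" (body.drop k)))

-- ===== PRECONDITION & SPEC =====
def Spec_split_header_and_body_py (content : String) (out : List String × String) : Prop := out = split_header_and_body_py_alt content
instance (content : String) (out : List String × String) : Decidable (Spec_split_header_and_body_py content out) := by unfold Spec_split_header_and_body_py; infer_instance

-- ===== CLAIM (what is proved, stated in full; the proofs are below) =====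
def Claim_equal_split_header_and_body_py : Prop := ∀ (content : String), Dom_split_header_and_body_py content → Spec_split_header_and_body_py content (split_header_and_body_py content)

-- ===== LEMMAS AND PROOFS =====

-- A's fold routes lines-before-first-separator to header, lines-after to body.
theorem foldA_false (lines : List String) (h b : List String) :
    lines.foldl pvStepA (h, b, false) = (h, b ++ lines, false) := by
  induction lines generalizing b with
  | nil => simp
  | cons x xs ih =>
    rw [List.foldl_cons, show pvStepA (h, b, false) x = (h, b ++ [x], false) by simp [pvStepA], ih]
    simp

theorem foldA_true (lines : List String) (h b : List String) :
    lines.foldl pvStepA (h, b, true)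
    = (h ++ lines.takeWhile (fun l => !(PySem.Str.strip l == "---")),
       b ++ ((lines.dropWhile (fun l => !(PySem.Str.strip l == "---"))).drop 1),
       lines.all (fun l => !(PySem.Str.strip l == "---"))) := by
  induction lines generalizing h with
  | nil => simp
  | cons x xs ih =>
    rw [List.foldl_cons]
    by_cases hx : PySem.Str.strip x == "---"
    · rw [show pvStepA (h, b, true) x = (h, b, false) by simp [pvStepA, hx], foldA_false]
      simp [hx]
    · rw [show pvStepA (h, b, true) x = (h ++ [x], b, true) by simp [pvStepA, hx], ih]
      simp [hx]

theorem takeWhile_not_eq_take_findIdx (p : String → Bool) (lines : List String) :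
    lines.takeWhile (fun l => !(p l)) = lines.take (lines.findIdx p) := by
  induction lines with
  | nil => simp
  | cons x xs ih =>
    by_cases hx : p x
    · simp [List.findIdx_cons, hx]
    · simp [List.findIdx_cons, hx, ih]

theorem dropWhile_not_eq_drop_findIdx (p : String → Bool) (lines : List String) :
    (lines.dropWhile (fun l => !(p l))).drop 1 = lines.drop (lines.findIdx p + 1) := by
  induction lines with
  | nil => simp
  | cons x xs ih =>
    by_cases hx : p x
    · simp [List.findIdx_cons, hx]
    · simpa [List.dropWhile_cons, List.findIdx_cons, hx] using ih

theorem popLead_eq_drop_skip (b : List String) :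
    pvPopLeadA b = b.drop (pvSkipDashesB b) := by
  induction b with
  | nil => rfl
  | cons x xs ih =>
    by_cases hx : PySem.Str.strip x == "---"
    · simp [pvPopLeadA, pvSkipDashesB, hx, ih, List.drop_succ_cons]
    · simp [pvPopLeadA, pvSkipDashesB, hx]

theorem popTrail_eq_take_trimEnd (lines : List String) (idx : Nat) (hle : idx ≤ lines.length) :
    pvPopTrailA (lines.take idx) = lines.take (pvTrimEndB lines idx) := by
  induction idx with
  | zero => simp [pvPopTrailA, pvTrimEndB]
  | succ e ih =>
    have he : e < lines.length := Nat.lt_of_succ_le hle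
    have htake : lines.take (e + 1) = lines.take e ++ [lines[e]] := by
      rw [List.take_add_one, List.getElem?_eq_getElem he]
      rfl
    have hrev : (lines.take (e + 1)).reverse = lines[e] :: (lines.take e).reverse := by
      rw [htake, List.reverse_append, List.reverse_singleton, List.singleton_append]
    by_cases hb : (PySem.Str.strip lines[e] == "") = true
    · have h1 : pvPopTrailA (lines.take (e + 1)) = pvPopTrailA (lines.take e) := by
        unfold pvPopTrailA
        rw [hrev, List.dropWhile_cons]
        simp [hb]
      rw [h1, ih (Nat.le_of_lt he), pvTrimEndB]
      simp [List.getD, List.getElem?_eq_getElem he, hb]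
    · have h1 : pvPopTrailA (lines.take (e + 1)) = lines.take (e + 1) := by
        unfold pvPopTrailA
        rw [hrev, List.dropWhile_cons]
        simp only [hb, if_false, Bool.false_eq_true]
        rw [← hrev, List.reverse_reverse]
      rw [h1, pvTrimEndB]
      simp [List.getD, List.getElem?_eq_getElem he, hb]

-- ===== VERDICT (by name: the statement is the Claim_ definition above) =====
theorem split_header_and_body_py_spec : Claim_equal_split_header_and_body_py := by
  intro content _
  simp only [Spec_split_header_and_body_py, split_header_and_body_py, split_header_and_body_py_alt]
  rw [foldA_true]
  simp only [List.nil_append,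
    takeWhile_not_eq_take_findIdx (fun l => PySem.Str.strip l == "---"),
    dropWhile_not_eq_drop_findIdx (fun l => PySem.Str.strip l == "---"),
    popLead_eq_drop_skip]
  rw [popTrail_eq_take_trimEnd _ _ List.findIdx_le_length]
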